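-- pv_equiv track=rewrite | github.com/mikulatomas/fcapsy-experiments | fcapsy_experiments/typicality/top_r_similarity.py | _r_values_or_until_differs
-- ===== SOURCE A (Python) =====
-- def _r_values_or_until_differs(iterator, r):
--     max_idx = len(iterator) - 1
--
--     if r == 0:
--         return []
--
--     for idx in range(len(iterator)):
--         if idx + 1 < r or (idx < max_idx and iterator[idx] == iterator[idx + 1]):
--             yield iterator[idx]
--         else:
--             yield iterator[idx]
--             break
-- ===== SOURCE B (Python) =====
-- def _r_values_or_until_differs(iterator, r):
--     if r == 0:
--         return
--     n = len(iterator)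
--     if r >= n:
--         yield from iterator
--         return
--     j = max(r - 1, 0)
--     while j < n - 1 and iterator[j] == iterator[j + 1]:
--         j += 1
--     yield from iterator[:j + 1]
-- ===== Notes on version B (the rewrite author's own statement) =====
-- stated objective: alternative
-- what changed: A interleaves yielding with a per-element test-and-break loop; B first dispatches the r==0 and r>=len cases, then locates the cut boundary j with a while loop over equal neighbours and emits the prefix slice iterator[:j+1].
import Mathlib
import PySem

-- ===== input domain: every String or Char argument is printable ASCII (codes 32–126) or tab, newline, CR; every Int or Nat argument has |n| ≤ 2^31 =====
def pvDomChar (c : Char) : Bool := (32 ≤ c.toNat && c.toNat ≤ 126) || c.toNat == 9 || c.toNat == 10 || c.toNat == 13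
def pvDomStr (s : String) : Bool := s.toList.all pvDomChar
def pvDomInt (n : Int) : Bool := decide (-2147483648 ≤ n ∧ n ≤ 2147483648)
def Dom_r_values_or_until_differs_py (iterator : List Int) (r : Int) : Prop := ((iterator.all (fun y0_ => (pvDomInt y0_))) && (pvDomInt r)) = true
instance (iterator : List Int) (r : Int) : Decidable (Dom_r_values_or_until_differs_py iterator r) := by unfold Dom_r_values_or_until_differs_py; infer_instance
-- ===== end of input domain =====

-- B replaces A's per-element yield-and-break loop by locating the cut boundary with a
-- while loop and emitting the prefix slice (objective: alternative decomposition, same cost).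
-- Both A and B are Python generators; equivalence is about the yielded sequence of values.

-- ===== PORT A =====
-- A's for-loop with break: structural recursion on idx with fuel = len - idx
def pvLoopA (it : List Int) (r maxIdx : Int) : Nat → Nat → List Int
  | _, 0 => []
  | idx, fuel+1 =>
    if (idx : Int) + 1 < r ∨ ((idx : Int) < maxIdx ∧ it.getD idx 0 = it.getD (idx+1) 0) then
      it.getD idx 0 :: pvLoopA it r maxIdx (idx+1) fuel
    else
      [it.getD idx 0]

def r_values_or_until_differs_py (iterator : List Int) (r : Int) : List Int :=
  let maxIdx : Int := (iterator.length : Int) - 1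
  if r = 0 then []
  else pvLoopA iterator r maxIdx 0 iterator.length

-- ===== PORT B =====
-- B's while loop extending j through equal neighbours
def pvWhileB (it : List Int) (j : Nat) : Nat :=
  if h : j < it.length - 1 ∧ it.getD j 0 = it.getD (j+1) 0 then
    pvWhileB it (j+1)
  else j
termination_by it.length - 1 - j
decreasing_by omega

def r_values_or_until_differs_py_alt (iterator : List Int) (r : Int) : List Int :=
  if r = 0 then []
  else if (iterator.length : Int) ≤ r then iterator
  else
    let j0 : Nat := (max (r - 1) 0).toNat
    let j : Nat := pvWhileB iterator j0
    iterator.take (j + 1)   -- iterator[:j+1], j+1 ≥ 1 so the slice is exactly take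

-- ===== PRECONDITION & SPEC =====
def Spec_r_values_or_until_differs_py (iterator : List Int) (r : Int) (out : List Int) : Prop := out = r_values_or_until_differs_py_alt iterator r
instance (iterator : List Int) (r : Int) (out : List Int) : Decidable (Spec_r_values_or_until_differs_py iterator r out) := by unfold Spec_r_values_or_until_differs_py; infer_instance

-- ===== CLAIM (what is proved, stated in full; the proofs are below) =====
def Claim_equal_r_values_or_until_differs_py : Prop := ∀ (iterator : List Int) (r : Int), Dom_r_values_or_until_differs_py iterator r → Spec_r_values_or_until_differs_py iterator r (r_values_or_until_differs_py iterator r)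

-- ===== LEMMAS AND PROOFS =====

theorem pvWhileB_ge (it : List Int) (j : Nat) : j ≤ pvWhileB it j := by
  fun_induction pvWhileB it j with
  | case1 j h ih => omega
  | case2 j h => omega

-- when r ≥ len, A yields the whole tail from idx
theorem pvLoopA_all (it : List Int) (r : Int) (hr : (it.length : Int) ≤ r) :
    ∀ fuel idx, fuel = it.length - idx → idx < it.length →
      pvLoopA it r ((it.length : Int) - 1) idx fuel = it.drop idx := by
  intro fuel
  induction fuel with
  | zero => intro idx h1 h2; omega
  | succ n ih =>
    intro idx h1 h2
    rw [pvLoopA]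
    by_cases hc : (idx : Int) + 1 < r ∨ ((idx : Int) < (it.length : Int) - 1 ∧ it.getD idx 0 = it.getD (idx+1) 0)
    · rw [if_pos hc]
      have hlt : idx + 1 < it.length ∨ idx + 1 = it.length := by omega
      rcases hlt with hlt | hlt
      · rw [ih (idx+1) (by omega) hlt,
          List.drop_eq_getElem_cons (by omega : idx < it.length), List.getD_eq_getElem it 0 h2]
      · -- idx+1 = len: the for-range is exhausted, fuel n = 0
        have hn : n = 0 := by omega
        subst hn
        rw [List.drop_eq_getElem_cons (by omega : idx < it.length), List.getD_eq_getElem it 0 h2,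
          List.drop_of_length_le (by omega), pvLoopA]
    · rw [if_neg hc]
      -- here idx+1 ≥ r ≥ len, so idx = len - 1
      have hidx : idx + 1 = it.length := by
        push Not at hc
        omega
      rw [List.drop_eq_getElem_cons (by omega : idx < it.length), List.getD_eq_getElem it 0 h2]
      have : it.drop (idx+1) = [] := List.drop_of_length_le (by omega)
      rw [this]

-- main invariant when 0 < len and r < len
theorem pvLoopA_take (it : List Int) (r : Int) (hrn : r < (it.length : Int)) :
    ∀ fuel idx, fuel = it.length - idx → idx < it.length →
      pvLoopA it r ((it.length : Int) - 1) idx fuel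
        = (it.take (pvWhileB it (max idx (max (r - 1) 0).toNat) + 1)).drop idx := by
  intro fuel
  induction fuel with
  | zero => intro idx h1 h2; omega
  | succ n ih =>
    intro idx h1 h2
    have hj0cast : (((max (r - 1) 0).toNat : Int)) = max (r - 1) 0 :=
      Int.toNat_of_nonneg (le_max_right _ _)
    by_cases hij : idx < (max (r - 1) 0).toNat
    · -- idx before the r-prefix boundary: A's first disjunct fires
      have hcond : (idx : Int) + 1 < r := by omega
      have hlt : idx + 1 < it.length := by omega
      rw [pvLoopA, if_pos (Or.inl hcond), ih (idx+1) (by omega) hlt]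
      have hmax1 : max idx (max (r - 1) 0).toNat = (max (r - 1) 0).toNat := by omega
      have hmax2 : max (idx+1) (max (r - 1) 0).toNat = (max (r - 1) 0).toNat := by omega
      rw [hmax1, hmax2]
      have hW := pvWhileB_ge it (max (r - 1) 0).toNat
      have hidxlt : idx < (it.take (pvWhileB it (max (r - 1) 0).toNat + 1)).length := by
        simp [List.length_take]; omega
      rw [List.drop_eq_getElem_cons hidxlt, List.getElem_take, List.getD_eq_getElem it 0 h2]
    · -- idx at or past the boundary: A's condition coincides with B's while condition
      have hmax : max idx (max (r - 1) 0).toNat = idx := by omega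
      rw [hmax]
      have hnc1 : ¬ ((idx : Int) + 1 < r) := by omega
      by_cases hc : (idx : Int) < (it.length : Int) - 1 ∧ it.getD idx 0 = it.getD (idx+1) 0
      · have hnat : idx < it.length - 1 := by omega
        have hWstep : pvWhileB it idx = pvWhileB it (idx+1) := by
          rw [pvWhileB, dif_pos ⟨hnat, hc.2⟩]
        have hlt : idx + 1 < it.length := by omega
        rw [pvLoopA, if_pos (Or.inr hc), ih (idx+1) (by omega) hlt]
        have hmax2 : max (idx+1) (max (r - 1) 0).toNat = idx + 1 := by omega
        rw [hmax2, hWstep]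
        have hW := pvWhileB_ge it (idx+1)
        have hidxlt : idx < (it.take (pvWhileB it (idx+1) + 1)).length := by
          simp [List.length_take]; omega
        rw [List.drop_eq_getElem_cons hidxlt, List.getElem_take, List.getD_eq_getElem it 0 h2]
      · have hneg : ¬ ((idx : Int) + 1 < r ∨ ((idx : Int) < (it.length : Int) - 1 ∧ it.getD idx 0 = it.getD (idx+1) 0)) := by
          rintro (h | h)
          · exact hnc1 h
          · exact hc h
        have hWstop : pvWhileB it idx = idx := by
          rw [pvWhileB, dif_neg]
          rintro ⟨ha, hb⟩
          exact hc ⟨by omega, hb⟩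
        rw [pvLoopA, if_neg hneg, hWstop]
        have hidxlt : idx < (it.take (idx + 1)).length := by
          simp [List.length_take]; omega
        rw [List.drop_eq_getElem_cons hidxlt, List.getElem_take, List.getD_eq_getElem it 0 h2,
          List.drop_of_length_le (by simp [List.length_take] : (it.take (idx+1)).length ≤ idx + 1)]

-- ===== VERDICT (by name: the statement is the Claim_ definition above) =====
theorem r_values_or_until_differs_py_spec : Claim_equal_r_values_or_until_differs_py := by
  intro it r _
  unfold Spec_r_values_or_until_differs_py r_values_or_until_differs_py r_values_or_until_differs_py_alt
  by_cases h0 : r = 0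
  · simp [h0]
  · rw [if_neg h0, if_neg h0]
    by_cases hnil : it.length = 0
    · have : it = [] := List.eq_nil_of_length_eq_zero hnil
      subst this
      by_cases hge : ((([] : List Int).length : Int)) ≤ r
      · rw [if_pos hge]; simp [pvLoopA]
      · rw [if_neg hge]; simp [pvLoopA]
    · by_cases hge : (it.length : Int) ≤ r
      · rw [if_pos hge, pvLoopA_all it r hge it.length 0 (by omega) (by omega), List.drop_zero]
      · rw [if_neg hge, pvLoopA_take it r (by omega) it.length 0 (by omega) (by omega),
          Nat.zero_max, List.drop_zero]
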